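-- pv_equiv track=rewrite | github.com/hxhhhlalala/vllm-omni | tools/wan22/merge_mxfp4_dualscale_checkpoint.py | _strip_linear_wrapper
-- ===== SOURCE A (Python) =====
-- def _strip_linear_wrapper(key: str) -> tuple[str, str | None]:
--     """Strip .linear. or .div. wrappers from MXFP4 keys.
--
--     Returns (stripped_key, attr) where attr is one of:
--         'weight', 'weight_scale', 'weight_dual_scale', 'bias', 'mul_scale', None
--     """
--     for attr in ("weight_dual_scale", "weight_scale", "weight", "bias"):
--         suffix = f".linear.{attr}"
--         if key.endswith(suffix):
--             return key[: -len(suffix)], attr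
--
--     if key.endswith(".div.mul_scale"):
--         return key[: -len(".div.mul_scale")], "mul_scale"
--
--     return key, None
-- ===== SOURCE B (Python) =====
-- def _strip_linear_wrapper(key: str) -> tuple[str, str | None]:
--     """Strip .linear. or .div. wrappers from MXFP4 keys.
--
--     Parses the dotted tail once with rsplit instead of scanning each
--     fixed suffix with endswith.
--     """
--     parts = key.rsplit('.', 2)
--     if len(parts) == 3:
--         prefix, wrap, attr = parts
--         if wrap == 'linear' and attr in ('weight', 'weight_scale', 'weight_dual_scale', 'bias'):
--             return prefix, attr
--         if wrap == 'div' and attr == 'mul_scale':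
--             return prefix, 'mul_scale'
--     return key, None
-- ===== Notes on version B (the rewrite author's own statement) =====
-- stated objective: idiomatic
-- what changed: B right-splits the key once into at most three dot-separated parts (rsplit with maxsplit 2) and dispatches on the last two components via a membership test, instead of A's sequential endswith scan over five fixed suffixes with slicing per candidate.
import Mathlib
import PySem

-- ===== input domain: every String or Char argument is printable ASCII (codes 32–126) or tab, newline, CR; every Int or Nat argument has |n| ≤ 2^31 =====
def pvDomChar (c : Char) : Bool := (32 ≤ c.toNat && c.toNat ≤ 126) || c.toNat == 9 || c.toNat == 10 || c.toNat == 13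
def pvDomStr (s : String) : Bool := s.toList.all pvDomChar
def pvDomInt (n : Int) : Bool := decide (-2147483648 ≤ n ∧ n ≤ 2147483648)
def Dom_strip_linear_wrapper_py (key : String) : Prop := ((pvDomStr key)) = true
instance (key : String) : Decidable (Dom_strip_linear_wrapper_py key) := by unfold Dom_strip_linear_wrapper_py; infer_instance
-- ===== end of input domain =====

-- B replaces A's sequential endswith scan over five fixed suffixes by one rsplit('.', 2)
-- of the key and a dispatch on the last two dotted components (objective: idiomatic).

-- ===== PORT A =====
-- the tuple of attrs A scans, in A's order
def pvAttrs : List (List Char) := ["weight_dual_scale".toList, "weight_scale".toList, "weight".toList, "bias".toList]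

-- A's for-loop over the attrs, then the .div.mul_scale check, then the fallthrough
def pvALoop (cs : List Char) : List (List Char) → List Char × Option (List Char)
  | [] =>
    if PySem.Chars.endswith cs ".div.mul_scale".toList then
      (PySem.List.slice cs none (some (-((".div.mul_scale".toList.length : Nat) : Int))), some "mul_scale".toList)
    else (cs, none)
  | attr :: rest =>
    let sfx := ".linear.".toList ++ attr   -- f".linear.{attr}"
    if PySem.Chars.endswith cs sfx then
      (PySem.List.slice cs none (some (-(sfx.length : Int))), some attr)   -- key[: -len(suffix)]
    else pvALoop cs rest

def strip_linear_wrapper_py (key : String) : String × Option String :=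
  let r := pvALoop key.toList pvAttrs
  (String.ofList r.1, r.2.map String.ofList)

-- ===== PORT B =====
-- hand port of key.rsplit('.', 2) (exact for the one-char separator '.'):
-- scan the reversed key, peeling at most two rightmost '.'-separated pieces
def pvRsplitDot2 (cs : List Char) : List (List Char) :=
  let r := cs.reverse
  let p1 := r.takeWhile (· != '.')
  match r.dropWhile (· != '.') with
  | [] => [p1.reverse]
  | _ :: rest1 =>
    let p2 := rest1.takeWhile (· != '.')
    match rest1.dropWhile (· != '.') with
    | [] => [p2.reverse, p1.reverse]
    | _ :: rest2 => [rest2.reverse, p2.reverse, p1.reverse]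

def pvBCore (cs : List Char) : List Char × Option (List Char) :=
  match pvRsplitDot2 cs with
  | [pre, wrap, attr] =>
    if wrap = "linear".toList ∧ (attr = "weight".toList ∨ attr = "weight_scale".toList ∨
        attr = "weight_dual_scale".toList ∨ attr = "bias".toList) then
      (pre, some attr)
    else if wrap = "div".toList ∧ attr = "mul_scale".toList then
      (pre, some "mul_scale".toList)
    else (cs, none)
  | _ => (cs, none)

def strip_linear_wrapper_py_alt (key : String) : String × Option String :=
  let r := pvBCore key.toList
  (String.ofList r.1, r.2.map String.ofList)

-- ===== PRECONDITION & SPEC =====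
def Spec_strip_linear_wrapper_py (key : String) (out : String × Option String) : Prop := out = strip_linear_wrapper_py_alt key
instance (key : String) (out : String × Option String) : Decidable (Spec_strip_linear_wrapper_py key out) := by unfold Spec_strip_linear_wrapper_py; infer_instance

-- ===== CLAIM (what is proved, stated in full; the proofs are below) =====
def Claim_equal_strip_linear_wrapper_py : Prop := ∀ (key : String), Dom_strip_linear_wrapper_py key → Spec_strip_linear_wrapper_py key (strip_linear_wrapper_py key)

-- ===== LEMMAS AND PROOFS =====

lemma pv_takeWhile_app (a u : List Char) (ha : ∀ c ∈ a, c ≠ '.') :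
    (a ++ '.' :: u).takeWhile (· != '.') = a := by
  induction a with
  | nil => simp
  | cons x xs ih =>
    have hx : x ≠ '.' := ha x (by simp)
    simp only [List.cons_append, List.takeWhile_cons]
    simp [hx, ih (fun c hc => ha c (by simp [hc]))]

lemma pv_prefix_seg {a p u v : List Char} (ha : ∀ c ∈ a, c ≠ '.') (hp : ∀ c ∈ p, c ≠ '.') :
    a ++ '.' :: u <+: p ++ '.' :: v ↔ a = p ∧ u <+: v := by
  constructor
  · rintro ⟨t, ht⟩
    have h1 : a ++ '.' :: (u ++ t) = p ++ '.' :: v := by simpa using ht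
    have h2 : a = p := by
      have h3 := congrArg (List.takeWhile (· != '.')) h1
      rwa [pv_takeWhile_app a _ ha, pv_takeWhile_app p _ hp] at h3
    subst h2
    have h3 : u ++ t = v := by simpa using h1
    exact ⟨rfl, ⟨t, h3⟩⟩
  · rintro ⟨rfl, t, rfl⟩
    exact ⟨t, by simp⟩

lemma pv_endswith_iff_rev (cs sfx : List Char) :
    PySem.Chars.endswith cs sfx = true ↔ sfx.reverse <+: cs.reverse := by
  rw [PySem.Chars.endswith_iff _ _]
  exact List.reverse_prefix.symm

lemma pv_ends1 (cs sfx : List Char) (hs : '.' ∈ sfx) (hcs : ∀ c ∈ cs, c ≠ '.') :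
    PySem.Chars.endswith cs sfx = false := by
  rw [Bool.eq_false_iff]
  intro h
  obtain ⟨t, rfl⟩ := (PySem.Chars.endswith_iff _ _).mp h
  exact hcs '.' (by simp [hs]) rfl

lemma pv_ends2 (cs p1 rest1 wrapL attrL sfx : List Char)
    (hsfx : sfx = '.' :: (wrapL ++ '.' :: attrL))
    (hr : cs.reverse = p1 ++ '.' :: rest1)
    (h1 : ∀ c ∈ p1, c ≠ '.') (hrest : ∀ c ∈ rest1, c ≠ '.')
    (ha : ∀ c ∈ attrL, c ≠ '.') :
    PySem.Chars.endswith cs sfx = false := by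
  rw [Bool.eq_false_iff]
  intro h
  rw [pv_endswith_iff_rev, hr, hsfx] at h
  have hrev : ('.' :: (wrapL ++ '.' :: attrL)).reverse
      = attrL.reverse ++ '.' :: (wrapL.reverse ++ '.' :: ([] : List Char)) := by simp
  rw [hrev] at h
  have h2 := (pv_prefix_seg (fun c hc => ha c (List.mem_reverse.mp hc)) h1).mp h
  exact hrest '.' (h2.2.subset (by simp)) rfl

lemma pv_ends3 (cs p1 p2 rest2 wrapL attrL sfx : List Char)
    (hsfx : sfx = '.' :: (wrapL ++ '.' :: attrL))
    (hr : cs.reverse = p1 ++ '.' :: (p2 ++ '.' :: rest2))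
    (h1 : ∀ c ∈ p1, c ≠ '.') (h2 : ∀ c ∈ p2, c ≠ '.')
    (hw : ∀ c ∈ wrapL, c ≠ '.') (ha : ∀ c ∈ attrL, c ≠ '.') :
    (PySem.Chars.endswith cs sfx = true) ↔ (p2 = wrapL.reverse ∧ p1 = attrL.reverse) := by
  rw [pv_endswith_iff_rev, hr, hsfx]
  have hrev : ('.' :: (wrapL ++ '.' :: attrL)).reverse
      = attrL.reverse ++ '.' :: (wrapL.reverse ++ '.' :: ([] : List Char)) := by simp
  rw [hrev, pv_prefix_seg (fun c hc => ha c (List.mem_reverse.mp hc)) h1,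
      pv_prefix_seg (fun c hc => hw c (List.mem_reverse.mp hc)) h2]
  constructor
  · rintro ⟨hA, hW, -⟩; exact ⟨hW.symm, hA.symm⟩
  · rintro ⟨hW, hA⟩; exact ⟨hA.symm, hW.symm, List.nil_prefix⟩

lemma pv_slice_strip (pre sfx : List Char) (h : 0 < sfx.length) :
    PySem.List.slice (pre ++ sfx) none (some (-(sfx.length : Int))) = pre := by
  rw [PySem.List.slice_to_neg_natCast _ _ h]
  simp

lemma pv_slice_case (cs rest2 sfx : List Char) (hcs2 : cs = rest2.reverse ++ sfx) (h : 0 < sfx.length) :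
    PySem.List.slice cs none (some (-(sfx.length : Int))) = rest2.reverse := by
  rw [hcs2, pv_slice_strip _ _ h]

lemma pv_dropWhile_head {α : Type} (p : α → Bool) :
    ∀ (l : List α) (c : α) (r : List α), l.dropWhile p = c :: r → p c = false := by
  intro l
  induction l with
  | nil => intro c r h; simp at h
  | cons a as ih =>
    intro c r h
    by_cases hpa : p a = true
    · rw [List.dropWhile_cons, if_pos hpa] at h
      exact ih c r h
    · rw [List.dropWhile_cons, if_neg hpa] at h
      cases h
      simpa using hpa

lemma pv_core (cs : List Char) : pvALoop cs pvAttrs = pvBCore cs := by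
  rcases h1 : cs.reverse.dropWhile (· != '.') with - | ⟨c1, rest1⟩
  · -- no '.' in the key: every suffix check fails, rsplit yields one part
    have hB : pvBCore cs = (cs, none) := by simp only [pvBCore, pvRsplitDot2, h1]
    rw [hB]
    have hfree : ∀ c ∈ cs, c ≠ '.' := by
      intro c hc
      have := List.dropWhile_eq_nil_iff.mp h1 c (List.mem_reverse.mpr hc)
      simpa [bne_iff_ne] using this
    have e1 := pv_ends1 cs (".linear.".toList ++ "weight_dual_scale".toList) (by simp) hfree
    have e2 := pv_ends1 cs (".linear.".toList ++ "weight_scale".toList) (by simp) hfree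
    have e3 := pv_ends1 cs (".linear.".toList ++ "weight".toList) (by simp) hfree
    have e4 := pv_ends1 cs (".linear.".toList ++ "bias".toList) (by simp) hfree
    have e5 := pv_ends1 cs ".div.mul_scale".toList (by simp) hfree
    simp at e1 e2 e3 e4 e5
    simp [pvALoop, pvAttrs, e1, e2, e3, e4, e5]
  · have hc1 : c1 = '.' := by
      have := pv_dropWhile_head _ _ _ _ h1
      simpa using this
    subst hc1
    have hr1 : cs.reverse = cs.reverse.takeWhile (· != '.') ++ '.' :: rest1 := by
      conv_lhs => rw [← List.takeWhile_append_dropWhile (p := (· != '.')) (l := cs.reverse)]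
      rw [h1]
    have hfree1 : ∀ c ∈ cs.reverse.takeWhile (· != '.'), c ≠ '.' := by
      intro c hc
      simpa [bne_iff_ne] using List.mem_takeWhile_imp hc
    rcases h2 : rest1.dropWhile (· != '.') with - | ⟨c2, rest2⟩
    · -- exactly one '.' in the key: every suffix check fails, rsplit yields two parts
      have hB : pvBCore cs = (cs, none) := by simp only [pvBCore, pvRsplitDot2, h1, h2]
      rw [hB]
      have hfreeR : ∀ c ∈ rest1, c ≠ '.' := by
        intro c hc
        have := List.dropWhile_eq_nil_iff.mp h2 c hc
        simpa [bne_iff_ne] using this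
      have e1 := pv_ends2 cs _ rest1 "linear".toList "weight_dual_scale".toList
        (".linear.".toList ++ "weight_dual_scale".toList) (by simp) hr1 hfree1 hfreeR (by simp)
      have e2 := pv_ends2 cs _ rest1 "linear".toList "weight_scale".toList
        (".linear.".toList ++ "weight_scale".toList) (by simp) hr1 hfree1 hfreeR (by simp)
      have e3 := pv_ends2 cs _ rest1 "linear".toList "weight".toList
        (".linear.".toList ++ "weight".toList) (by simp) hr1 hfree1 hfreeR (by simp)
      have e4 := pv_ends2 cs _ rest1 "linear".toList "bias".toList
        (".linear.".toList ++ "bias".toList) (by simp) hr1 hfree1 hfreeR (by simp)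
      have e5 := pv_ends2 cs _ rest1 "div".toList "mul_scale".toList
        ".div.mul_scale".toList (by simp) hr1 hfree1 hfreeR (by simp)
      simp at e1 e2 e3 e4 e5
      simp [pvALoop, pvAttrs, e1, e2, e3, e4, e5]
    · -- at least two '.' in the key: compare the last two '.'-separated components
      have hc2 : c2 = '.' := by
        have := pv_dropWhile_head _ _ _ _ h2
        simpa using this
      subst hc2
      have hr2 : rest1 = rest1.takeWhile (· != '.') ++ '.' :: rest2 := by
        conv_lhs => rw [← List.takeWhile_append_dropWhile (p := (· != '.')) (l := rest1)]
        rw [h2]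
      have hfree2 : ∀ c ∈ rest1.takeWhile (· != '.'), c ≠ '.' := by
        intro c hc
        simpa [bne_iff_ne] using List.mem_takeWhile_imp hc
      have hr : cs.reverse = cs.reverse.takeWhile (· != '.') ++ '.' ::
          (rest1.takeWhile (· != '.') ++ '.' :: rest2) := by
        conv_lhs => rw [hr1]; rw [hr2]
      have hcs : cs = rest2.reverse ++ '.' ::
          ((rest1.takeWhile (· != '.')).reverse ++ '.' :: (cs.reverse.takeWhile (· != '.')).reverse) := by
        simpa using congrArg List.reverse hr
      simp only [pvBCore, pvRsplitDot2, h1, h2]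
      have e1 := pv_ends3 cs _ _ rest2 "linear".toList "weight_dual_scale".toList
        (".linear.".toList ++ "weight_dual_scale".toList) (by simp) hr hfree1 hfree2 (by simp) (by simp)
      have e2 := pv_ends3 cs _ _ rest2 "linear".toList "weight_scale".toList
        (".linear.".toList ++ "weight_scale".toList) (by simp) hr hfree1 hfree2 (by simp) (by simp)
      have e3 := pv_ends3 cs _ _ rest2 "linear".toList "weight".toList
        (".linear.".toList ++ "weight".toList) (by simp) hr hfree1 hfree2 (by simp) (by simp)
      have e4 := pv_ends3 cs _ _ rest2 "linear".toList "bias".toList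
        (".linear.".toList ++ "bias".toList) (by simp) hr hfree1 hfree2 (by simp) (by simp)
      have e5 := pv_ends3 cs _ _ rest2 "div".toList "mul_scale".toList
        ".div.mul_scale".toList (by simp) hr hfree1 hfree2 (by simp) (by simp)
      simp at e1 e2 e3 e4 e5
      by_cases hL : rest1.takeWhile (· != '.') = ['r', 'a', 'e', 'n', 'i', 'l']
      · by_cases hA1 : cs.reverse.takeWhile (· != '.') = ['e', 'l', 'a', 'c', 's', '_', 'l', 'a', 'u', 'd', '_', 't', 'h', 'g', 'i', 'e', 'w']
        · have hsl := pv_slice_case cs rest2 (".linear.".toList ++ "weight_dual_scale".toList)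
            (by rw [hcs, hL, hA1]; simp) (by simp)
          simp at hsl
          simp [pvALoop, pvAttrs, e1, hL, hA1, hsl]
        · by_cases hA2 : cs.reverse.takeWhile (· != '.') = ['e', 'l', 'a', 'c', 's', '_', 't', 'h', 'g', 'i', 'e', 'w']
          · have hsl := pv_slice_case cs rest2 (".linear.".toList ++ "weight_scale".toList)
              (by rw [hcs, hL, hA2]; simp) (by simp)
            simp at hsl
            simp [pvALoop, pvAttrs, e1, e2, hL, hA2, hsl]
          · by_cases hA3 : cs.reverse.takeWhile (· != '.') = ['t', 'h', 'g', 'i', 'e', 'w']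
            · have hsl := pv_slice_case cs rest2 (".linear.".toList ++ "weight".toList)
                (by rw [hcs, hL, hA3]; simp) (by simp)
              simp at hsl
              simp [pvALoop, pvAttrs, e1, e2, e3, hL, hA3, hsl]
            · by_cases hA4 : cs.reverse.takeWhile (· != '.') = ['s', 'a', 'i', 'b']
              · have hsl := pv_slice_case cs rest2 (".linear.".toList ++ "bias".toList)
                  (by rw [hcs, hL, hA4]; simp) (by simp)
                simp at hsl
                simp [pvALoop, pvAttrs, e1, e2, e3, e4, hL, hA4, hsl]
              · simp [pvALoop, pvAttrs, e1, e2, e3, e4, e5, hL, hA1, hA2, hA3, hA4, List.reverse_eq_iff]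
      · by_cases hD : rest1.takeWhile (· != '.') = ['v', 'i', 'd']
        · by_cases hA5 : cs.reverse.takeWhile (· != '.') = ['e', 'l', 'a', 'c', 's', '_', 'l', 'u', 'm']
          · have hsl := pv_slice_case cs rest2 (".div.mul_scale".toList)
              (by rw [hcs, hD, hA5]; simp) (by simp)
            simp at hsl
            simp [pvALoop, pvAttrs, e1, e2, e3, e4, e5, hD, hA5, hsl]
          · simp [pvALoop, pvAttrs, e1, e2, e3, e4, e5, hD, hA5, List.reverse_eq_iff]
        · simp [pvALoop, pvAttrs, e1, e2, e3, e4, e5, hL, hD, List.reverse_eq_iff]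

-- ===== VERDICT (by name: the statement is the Claim_ definition above) =====
theorem strip_linear_wrapper_py_spec : Claim_equal_strip_linear_wrapper_py := by
  intro key _
  unfold Spec_strip_linear_wrapper_py strip_linear_wrapper_py strip_linear_wrapper_py_alt
  rw [pv_core]
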